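-- pv_equiv track=rewrite | github.com/Lr-2002/nips2025_rebuttal | task_decomposition_scorer.py | _has_logical_ordering
-- ===== SOURCE A (Python) =====
-- from typing import List, Dict, Any, Tuple, Optional
--
-- def _has_logical_ordering(subtasks: List[str]) -> bool:
--     """Check if subtasks follow logical ordering patterns."""
--     if len(subtasks) < 2:
--         return True
--
--     # Look for common logical patterns
--     has_open_before_action = False
--     has_action_before_close = False
--
--     for i, task in enumerate(subtasks):
--         task_lower = task.lower()
--
--         # Check if open comes before pick/put actions
--         if 'open' in task_lower:
--             remaining_tasks = subtasks[i+1:]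
--             if any('pick' in t.lower() or 'put' in t.lower() for t in remaining_tasks):
--                 has_open_before_action = True
--
--         # Check if close comes after other actions
--         if 'close' in task_lower and i > 0:
--             previous_tasks = subtasks[:i]
--             if any(action in t.lower() for t in previous_tasks for action in ['pick', 'put', 'open']):
--                 has_action_before_close = True
--
--     return has_open_before_action or has_action_before_close
-- ===== SOURCE B (Python) =====
-- def _has_logical_ordering(subtasks):
--     """Check if subtasks follow logical ordering patterns (one pass over extreme keyword indices)."""
--     if len(subtasks) < 2:
--         return True
--     first_open = -1
--     first_any = -1   # earliest pick/put/open
--     last_pickput = -1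
--     last_close = -1
--     for i, task in enumerate(subtasks):
--         t = task.lower()
--         is_pick = 'pick' in t
--         is_put = 'put' in t
--         is_open = 'open' in t
--         if is_open and first_open == -1:
--             first_open = i
--         if (is_pick or is_put or is_open) and first_any == -1:
--             first_any = i
--         if is_pick or is_put:
--             last_pickput = i
--         if 'close' in t:
--             last_close = i
--     return (first_open != -1 and first_open < last_pickput) or \
--            (first_any != -1 and first_any < last_close)
-- ===== Notes on version B (the rewrite author's own statement) =====
-- stated objective: alternative
-- what changed: Replaced the per-index prefix/suffix rescans (slices + any) by a single pass that tracks the earliest 'open' and earliest pick/put/open index and the latest pick/put and latest 'close' index, then compares the extremes.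
import Mathlib
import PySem

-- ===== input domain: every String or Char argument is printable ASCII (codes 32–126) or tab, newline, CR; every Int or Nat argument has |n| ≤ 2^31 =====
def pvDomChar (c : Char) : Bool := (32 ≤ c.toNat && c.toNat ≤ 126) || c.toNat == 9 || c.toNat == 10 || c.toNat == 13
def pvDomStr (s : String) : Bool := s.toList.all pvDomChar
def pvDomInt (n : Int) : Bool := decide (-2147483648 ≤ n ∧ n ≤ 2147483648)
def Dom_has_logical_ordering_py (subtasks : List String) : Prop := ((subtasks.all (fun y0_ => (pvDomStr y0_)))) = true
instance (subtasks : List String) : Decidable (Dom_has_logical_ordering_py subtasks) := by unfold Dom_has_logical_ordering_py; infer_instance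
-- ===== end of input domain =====

-- B replaces A's per-index prefix/suffix rescans by one pass over extreme keyword indices
-- (earliest 'open' / pick-put-open, latest pick/put / 'close'); objective: alternative.

-- ===== PORT A =====
def has_logical_ordering_py (subtasks : List String) : Bool :=
  if subtasks.length < 2 then true
  else
    let r := (PySem.List.enumerate subtasks 0).foldl
      (fun (st : Bool × Bool) p =>
        let i := p.1
        let task_lower := PySem.Str.lower p.2
        let st1 :=
          if PySem.Str.isIn "open" task_lower then
            if (PySem.List.slice subtasks (some (i + 1)) none).any
                (fun t => PySem.Str.isIn "pick" (PySem.Str.lower t) ||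
                          PySem.Str.isIn "put" (PySem.Str.lower t)) then
              (true, st.2)
            else st
          else st
        if PySem.Str.isIn "close" task_lower && decide (0 < i) then
          if (PySem.List.slice subtasks none (some i)).any
              (fun t => (["pick", "put", "open"] : List String).any
                (fun a => PySem.Str.isIn a (PySem.Str.lower t))) then
            (st1.1, true)
          else st1
        else st1)
      (false, false)
    r.1 || r.2

-- ===== PORT B =====
def has_logical_ordering_py_alt (subtasks : List String) : Bool :=
  if subtasks.length < 2 then true
  else
    let r := (PySem.List.enumerate subtasks 0).foldl
      (fun (st : Int × Int × Int × Int) p =>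
        let i := p.1
        let t := PySem.Str.lower p.2
        let isPick := PySem.Str.isIn "pick" t
        let isPut := PySem.Str.isIn "put" t
        let isOpen := PySem.Str.isIn "open" t
        let fo := if isOpen && st.1 == -1 then i else st.1
        let fa := if (isPick || isPut || isOpen) && st.2.1 == -1 then i else st.2.1
        let lp := if isPick || isPut then i else st.2.2.1
        let lc := if PySem.Str.isIn "close" t then i else st.2.2.2
        (fo, fa, lp, lc))
      (-1, -1, -1, -1)
    (r.1 != -1 && decide (r.1 < r.2.2.1)) || (r.2.1 != -1 && decide (r.2.1 < r.2.2.2))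

-- ===== PRECONDITION & SPEC =====
def Spec_has_logical_ordering_py (subtasks : List String) (out : Bool) : Prop := out = has_logical_ordering_py_alt subtasks
instance (subtasks : List String) (out : Bool) : Decidable (Spec_has_logical_ordering_py subtasks out) := by unfold Spec_has_logical_ordering_py; infer_instance

-- ===== CLAIM (what is proved, stated in full; the proofs are below) =====
def Claim_equal_has_logical_ordering_py : Prop := ∀ (subtasks : List String), Dom_has_logical_ordering_py subtasks → Spec_has_logical_ordering_py subtasks (has_logical_ordering_py subtasks)

-- ===== LEMMAS AND PROOFS =====

-- keyword predicates shared by the proofs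
def oB (t : String) : Bool := PySem.Str.isIn "open" (PySem.Str.lower t)
def pB (t : String) : Bool :=
  PySem.Str.isIn "pick" (PySem.Str.lower t) || PySem.Str.isIn "put" (PySem.Str.lower t)
def cB (t : String) : Bool := PySem.Str.isIn "close" (PySem.Str.lower t)
def aB (t : String) : Bool := pB t || oB t

-- names for the two loop bodies (definitionally the port bodies)
def aStep (subtasks : List String) (st : Bool × Bool) (p : Int × String) : Bool × Bool :=
  let i := p.1
  let task_lower := PySem.Str.lower p.2
  let st1 :=
    if PySem.Str.isIn "open" task_lower then
      if (PySem.List.slice subtasks (some (i + 1)) none).any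
          (fun t => PySem.Str.isIn "pick" (PySem.Str.lower t) ||
                    PySem.Str.isIn "put" (PySem.Str.lower t)) then
        (true, st.2)
      else st
    else st
  if PySem.Str.isIn "close" task_lower && decide (0 < i) then
    if (PySem.List.slice subtasks none (some i)).any
        (fun t => (["pick", "put", "open"] : List String).any
          (fun a => PySem.Str.isIn a (PySem.Str.lower t))) then
      (st1.1, true)
    else st1
  else st1

def bStep (st : Int × Int × Int × Int) (p : Int × String) : Int × Int × Int × Int :=
  let i := p.1
  let t := PySem.Str.lower p.2
  let isPick := PySem.Str.isIn "pick" t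
  let isPut := PySem.Str.isIn "put" t
  let isOpen := PySem.Str.isIn "open" t
  let fo := if isOpen && st.1 == -1 then i else st.1
  let fa := if (isPick || isPut || isOpen) && st.2.1 == -1 then i else st.2.1
  let lp := if isPick || isPut then i else st.2.2.1
  let lc := if PySem.Str.isIn "close" t then i else st.2.2.2
  (fo, fa, lp, lc)

theorem a_eq (l : List String) :
    has_logical_ordering_py l =
      if l.length < 2 then true
      else
        let r := (PySem.List.enumerate l 0).foldl (aStep l) (false, false)
        r.1 || r.2 := rfl

theorem b_eq (l : List String) :
    has_logical_ordering_py_alt l =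
      if l.length < 2 then true
      else
        let r := (PySem.List.enumerate l 0).foldl bStep (-1, -1, -1, -1)
        (r.1 != -1 && decide (r.1 < r.2.2.1)) ||
          (r.2.1 != -1 && decide (r.2.1 < r.2.2.2)) := rfl

-- last index (from the back) at which p holds
def lastIdx? (p : String → Bool) : List String → Option Nat
  | [] => none
  | x :: xs =>
    match lastIdx? p xs with
    | some k => some (k + 1)
    | none => if p x then some 0 else none

theorem lastIdx?_eq_some {p : String → Bool} {l : List String} {k : Nat}
    (h : lastIdx? p l = some k) : ∃ hk : k < l.length, p l[k] = true := by
  induction l generalizing k with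
  | nil => simp [lastIdx?] at h
  | cons x xs ih =>
    simp only [lastIdx?] at h
    cases hx : lastIdx? p xs with
    | some m =>
      rw [hx] at h
      obtain rfl : m + 1 = k := by simpa using h
      obtain ⟨hm, hpm⟩ := ih hx
      exact ⟨by simpa using Nat.succ_lt_succ hm, by simpa using hpm⟩
    | none =>
      rw [hx] at h
      by_cases hpx : p x = true
      · simp [hpx] at h; subst h; exact ⟨by simp, by simpa using hpx⟩
      · simp [hpx] at h

theorem le_lastIdx? {p : String → Bool} {l : List String} {j : Nat}
    (hj : j < l.length) (hp : p l[j] = true) : ∃ k, lastIdx? p l = some k ∧ j ≤ k := by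
  induction l generalizing j with
  | nil => simp at hj
  | cons x xs ih =>
    cases j with
    | zero =>
      cases hx : lastIdx? p xs with
      | some m => exact ⟨m + 1, by simp [lastIdx?, hx], Nat.zero_le _⟩
      | none => exact ⟨0, by simp [lastIdx?, hx]; simpa using hp, le_rfl⟩
    | succ j' =>
      obtain ⟨k, hk, hjk⟩ := ih (by simpa using Nat.lt_of_succ_lt_succ hj) (by simpa using hp)
      exact ⟨k + 1, by simp [lastIdx?, hk], Nat.succ_le_succ hjk⟩

-- Int views of first/last index, offset by the enumerate start
def fInt (p : String → Bool) (l : List String) (s : Nat) : Int :=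
  match List.findIdx? p l with
  | some k => ((s + k : Nat) : Int)
  | none => -1

def lInt (p : String → Bool) (l : List String) (s : Nat) (acc : Int) : Int :=
  match lastIdx? p l with
  | some k => ((s + k : Nat) : Int)
  | none => acc

theorem fInt_cons (p : String → Bool) (x : String) (xs : List String) (s : Nat) :
    fInt p (x :: xs) s = if p x then (s : Int) else fInt p xs (s + 1) := by
  by_cases hx : p x = true
  · simp [fInt, List.findIdx?_cons, hx]
  · simp only [Bool.not_eq_true] at hx
    simp only [fInt, List.findIdx?_cons, hx]
    cases h : List.findIdx? p xs with
    | some k => simp [h]; omega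
    | none => simp [h, hx]

theorem lInt_cons (p : String → Bool) (x : String) (xs : List String) (s : Nat) (acc : Int) :
    lInt p (x :: xs) s acc = lInt p xs (s + 1) (if p x then (s : Int) else acc) := by
  simp only [lInt, lastIdx?]
  cases h : lastIdx? p xs with
  | some k => simp [h]; omega
  | none => by_cases hx : p x = true <;> simp [h, hx]

theorem fInt_nonneg_of_ne {p : String → Bool} {l : List String} {s : Nat}
    (h : fInt p l s ≠ -1) :
    ∃ k, List.findIdx? p l = some k ∧ fInt p l s = ((s + k : Nat) : Int) := by
  unfold fInt at *
  cases hf : List.findIdx? p l with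
  | some k => exact ⟨k, rfl, by simp⟩
  | none => rw [hf] at h; simp at h

-- B's fold computes the four extreme indices
theorem b_fold (l : List String) (s : Nat) (fo fa lp lc : Int) :
    (PySem.List.enumerate l (s : Int)).foldl bStep (fo, fa, lp, lc) =
    ((if fo == -1 then fInt oB l s else fo),
     (if fa == -1 then fInt aB l s else fa),
     lInt pB l s lp,
     lInt cB l s lc) := by
  induction l generalizing s fo fa lp lc with
  | nil =>
    simp only [PySem.List.enumerate_nil, List.foldl_nil, fInt, lInt, List.findIdx?_nil, lastIdx?]
    refine Prod.ext ?_ (Prod.ext ?_ rfl)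
    · simp only; split <;> simp_all
    · simp only; split <;> simp_all
  | cons x xs ih =>
    rw [PySem.List.enumerate_cons, List.foldl_cons]
    have hs1 : (s : Int) + 1 = ((s + 1 : Nat) : Int) := by push_cast; ring
    rw [hs1]
    show (PySem.List.enumerate xs ((s + 1 : Nat) : Int)).foldl bStep (bStep (fo, fa, lp, lc) ((s : Int), x)) = _
    rw [show bStep (fo, fa, lp, lc) ((s : Int), x) =
        ((if oB x && fo == -1 then (s : Int) else fo),
         (if aB x && fa == -1 then (s : Int) else fa),
         (if pB x then (s : Int) else lp),
         (if cB x then (s : Int) else lc)) from by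
      simp only [bStep, aB, pB, oB, cB, Bool.or_assoc]
      rfl]
    rw [ih]
    simp only [fInt_cons, lInt_cons]
    refine Prod.ext ?_ (Prod.ext ?_ (Prod.ext rfl rfl)) <;> simp only
    · by_cases ho : oB x = true <;>
        by_cases hfo : fo = -1 <;> simp [ho, hfo] <;> split <;> simp_all <;> omega
    · by_cases ha : aB x = true <;>
        by_cases hfa : fa = -1 <;> simp [ha, hfa] <;> split <;> simp_all <;> omega

-- A's step is an OR-accumulating step
theorem a_step_or (l : List String) (st : Bool × Bool) (p : Int × String) :
    aStep l st p =
    (st.1 || (oB p.2 && (PySem.List.slice l (some (p.1 + 1)) none).any pB),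
     st.2 || (cB p.2 && decide (0 < p.1) &&
       (PySem.List.slice l none (some p.1)).any aB)) := by
  obtain ⟨i, t⟩ := p
  obtain ⟨b1, b2⟩ := st
  have hinner : (fun u => (["pick", "put", "open"] : List String).any
      (fun a => PySem.Str.isIn a (PySem.Str.lower u))) = aB := by
    funext u
    simp only [List.any_cons, List.any_nil, Bool.or_false, aB, pB, oB, Bool.or_assoc]
  have hpb : (fun u => PySem.Str.isIn "pick" (PySem.Str.lower u) ||
      PySem.Str.isIn "put" (PySem.Str.lower u)) = pB := by
    funext u; simp only [pB]
  unfold aStep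
  simp only [hinner, hpb, oB, cB]
  cases PySem.Str.isIn "open" (PySem.Str.lower t) <;>
    cases (PySem.List.slice l (some (i + 1)) none).any pB <;>
    cases PySem.Str.isIn "close" (PySem.Str.lower t) <;>
    cases decide (0 < i) <;>
    cases (PySem.List.slice l none (some i)).any aB <;>
    cases b1 <;> cases b2 <;> rfl

-- an OR-accumulating pair fold is a pair of `any`s
theorem foldl_or_pair {α : Type} (f g : α → Bool) (l : List α) (a b : Bool) :
    l.foldl (fun st p => (st.1 || f p, st.2 || g p)) (a, b) = (a || l.any f, b || l.any g) := by
  induction l generalizing a b with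
  | nil => simp
  | cons x xs ih => simp [ih, Bool.or_assoc]

-- any over enumerate ↔ exists an index
theorem any_enumerate {α : Type} (l : List α) (s : Nat) (f : Int × α → Bool) :
    (PySem.List.enumerate l (s : Int)).any f = true ↔
      ∃ k, ∃ hk : k < l.length, f (((s + k : Nat) : Int), l[k]) = true := by
  induction l generalizing s with
  | nil => simp [PySem.List.enumerate_nil]
  | cons x xs ih =>
    rw [PySem.List.enumerate_cons]
    have hs1 : (s : Int) + 1 = ((s + 1 : Nat) : Int) := by push_cast; ring
    simp only [List.any_cons, Bool.or_eq_true, hs1, ih]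
    constructor
    · rintro (h | ⟨k, hk, hf⟩)
      · exact ⟨0, by simp, by simpa using h⟩
      · exact ⟨k + 1, by simpa using Nat.succ_lt_succ hk, by
          have h' : s + 1 + k = s + (k + 1) := by omega
          simpa [h'] using hf⟩
    · rintro ⟨k, hk, hf⟩
      cases k with
      | zero => left; simpa using hf
      | succ k' =>
        right
        exact ⟨k', by simpa using Nat.lt_of_succ_lt_succ hk, by
          have h' : s + (k' + 1) = s + 1 + k' := by omega
          simpa [h'] using hf⟩

-- the two existential readings of A's scan
theorem a_any_open (l : List String) :
    ((PySem.List.enumerate l ((0 : Nat) : Int)).any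
      (fun p => oB p.2 && (PySem.List.slice l (some (p.1 + 1)) none).any pB)) = true ↔
      ∃ k, ∃ hk : k < l.length, ∃ j, ∃ hj : j < l.length,
        k < j ∧ oB l[k] = true ∧ pB l[j] = true := by
  rw [any_enumerate]
  constructor
  · rintro ⟨k, hk, hf⟩
    simp only [Nat.zero_add] at hf
    have hcast : ((k : Nat) : Int) + 1 = (((k + 1 : Nat)) : Int) := by push_cast; ring
    rw [hcast, PySem.List.slice_from_natCast] at hf
    simp only [Bool.and_eq_true, List.any_eq_true] at hf
    obtain ⟨ho, t, ht, hpt⟩ := hf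
    obtain ⟨m, hm, rfl⟩ := List.mem_iff_getElem.mp ht
    simp only [List.getElem_drop] at hpt
    have hlen := hm
    simp only [List.length_drop] at hlen
    exact ⟨k, hk, k + 1 + m, by omega, by omega, ho, hpt⟩
  · rintro ⟨k, hk, j, hj, hkj, ho, hp⟩
    refine ⟨k, hk, ?_⟩
    simp only [Nat.zero_add]
    have hcast : ((k : Nat) : Int) + 1 = (((k + 1 : Nat)) : Int) := by push_cast; ring
    rw [hcast, PySem.List.slice_from_natCast]
    simp only [Bool.and_eq_true, List.any_eq_true]
    refine ⟨ho, l[j], ?_, hp⟩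
    apply List.mem_iff_getElem.mpr
    refine ⟨j - (k + 1), by simp [List.length_drop]; omega, ?_⟩
    rw [List.getElem_drop]
    congr 1
    omega

theorem a_any_close (l : List String) :
    ((PySem.List.enumerate l ((0 : Nat) : Int)).any
      (fun p => cB p.2 && decide (0 < p.1) &&
        (PySem.List.slice l none (some p.1)).any aB)) = true ↔
      ∃ k, ∃ hk : k < l.length, ∃ j, ∃ hj : j < l.length,
        j < k ∧ aB l[j] = true ∧ cB l[k] = true := by
  rw [any_enumerate]
  constructor
  · rintro ⟨k, hk, hf⟩
    simp only [Nat.zero_add, PySem.List.slice_to_natCast] at hf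
    simp only [Bool.and_eq_true, List.any_eq_true, decide_eq_true_eq] at hf
    obtain ⟨⟨hc, _⟩, t, ht, hat⟩ := hf
    obtain ⟨m, hm, rfl⟩ := List.mem_iff_getElem.mp ht
    have hmk : m < k := by simp [List.length_take] at hm; omega
    simp only [List.getElem_take] at hat
    exact ⟨k, hk, m, by omega, hmk, hat, hc⟩
  · rintro ⟨k, hk, j, hj, hjk, ha, hc⟩
    refine ⟨k, hk, ?_⟩
    simp only [Nat.zero_add, PySem.List.slice_to_natCast]
    simp only [Bool.and_eq_true, List.any_eq_true, decide_eq_true_eq]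
    refine ⟨⟨hc, by omega⟩, l[j], ?_, ha⟩
    apply List.mem_iff_getElem.mpr
    refine ⟨j, by simp [List.length_take]; omega, by simp [List.getElem_take]⟩

-- the extreme-index test matches the existential reading
theorem extremes_iff (q r : String → Bool) (l : List String) :
    ((fInt q l 0 != -1 && decide (fInt q l 0 < lInt r l 0 (-1))) = true) ↔
      ∃ k, ∃ hk : k < l.length, ∃ j, ∃ hj : j < l.length,
        k < j ∧ q l[k] = true ∧ r l[j] = true := by
  constructor
  · intro h
    simp only [Bool.and_eq_true, bne_iff_ne, ne_eq, decide_eq_true_eq] at h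
    obtain ⟨hne, hlt⟩ := h
    obtain ⟨a, ha, hfa⟩ := fInt_nonneg_of_ne hne
    have hq := List.findIdx?_eq_some_iff_findIdx_eq.mp ha
    have haq : q (l[a]'hq.1) = true := by
      have hg := List.findIdx_getElem (p := q) (xs := l) (w := by omega)
      simp only [hq.2] at hg
      exact hg
    have hfa2 : fInt q l 0 = (a : Int) := by simpa using hfa
    cases hb : lastIdx? r l with
    | none =>
      exfalso
      have hln : lInt r l 0 (-1) = -1 := by simp [lInt, hb]
      rw [hfa2, hln] at hlt
      omega
    | some b =>
      have hlb : lInt r l 0 (-1) = (b : Int) := by simp [lInt, hb]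
      rw [hfa2, hlb] at hlt
      have hab : a < b := by exact_mod_cast hlt
      obtain ⟨hbl, hrb⟩ := lastIdx?_eq_some hb
      exact ⟨a, hq.1, b, hbl, hab, haq, hrb⟩
  · rintro ⟨k, hk, j, hj, hkj, hq, hr⟩
    have hfl : List.findIdx q l < l.length :=
      List.findIdx_lt_length.mpr ⟨l[k], List.getElem_mem hk, hq⟩
    have hle : List.findIdx q l ≤ k := by
      rcases Nat.lt_or_ge k (List.findIdx q l) with hgt | hge
      · exact absurd hq (by simpa using List.not_of_lt_findIdx hgt)
      · exact hge
    obtain ⟨b, hb, hjb⟩ := le_lastIdx? hj hr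
    have hsome : List.findIdx? q l = some (List.findIdx q l) :=
      List.findIdx?_eq_some_iff_findIdx_eq.mpr ⟨hfl, rfl⟩
    have h1 : fInt q l 0 = ((List.findIdx q l : Nat) : Int) := by simp [fInt, hsome]
    have h2 : lInt r l 0 (-1) = ((b : Nat) : Int) := by simp [lInt, hb]
    rw [h1, h2]
    simp only [Bool.and_eq_true, bne_iff_ne, ne_eq, decide_eq_true_eq]
    exact ⟨by omega, by omega⟩

-- ===== VERDICT (by name: the statement is the Claim_ definition above) =====
theorem has_logical_ordering_py_spec : Claim_equal_has_logical_ordering_py := by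
  intro l _
  unfold Spec_has_logical_ordering_py
  rw [a_eq, b_eq]
  by_cases hlen : l.length < 2
  · simp [hlen]
  · simp only [hlen, if_false]
    have h0 : (0 : Int) = ((0 : Nat) : Int) := by norm_num
    rw [h0, b_fold]
    have hstep : aStep l = fun (st : Bool × Bool) p =>
        (st.1 || (oB p.2 && (PySem.List.slice l (some (p.1 + 1)) none).any pB),
         st.2 || (cB p.2 && decide (0 < p.1) &&
           (PySem.List.slice l none (some p.1)).any aB)) := by
      funext st p; exact a_step_or l st p
    rw [hstep, foldl_or_pair]
    simp only [Bool.false_or, beq_self_eq_true, if_true]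
    have h1 : ((PySem.List.enumerate l ((0 : Nat) : Int)).any
        (fun p => oB p.2 && (PySem.List.slice l (some (p.1 + 1)) none).any pB)) =
        (fInt oB l 0 != -1 && decide (fInt oB l 0 < lInt pB l 0 (-1))) := by
      rw [Bool.eq_iff_iff, a_any_open, Iff.comm, extremes_iff]
    have h2 : ((PySem.List.enumerate l ((0 : Nat) : Int)).any
        (fun p => cB p.2 && decide (0 < p.1) &&
          (PySem.List.slice l none (some p.1)).any aB)) =
        (fInt aB l 0 != -1 && decide (fInt aB l 0 < lInt cB l 0 (-1))) := by
      rw [Bool.eq_iff_iff, a_any_close, Iff.comm, extremes_iff]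
      constructor
      · rintro ⟨k, hk, j, hj, hkj, hq, hr⟩; exact ⟨j, hj, k, hk, hkj, hq, hr⟩
      · rintro ⟨k, hk, j, hj, hkj, hq, hr⟩; exact ⟨j, hj, k, hk, hkj, hq, hr⟩
    rw [h1, h2]
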